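-- pv_equiv track=rewrite | github.com/sheep431/csdn-automation-system | app/publishers/body_assets.py | insert_header_image_after_first_blockquote
-- ===== SOURCE A (Python) =====
-- def insert_header_image_after_first_blockquote(markdown: str, image_markdown: str) -> str:
--     if not image_markdown.strip() or image_markdown in markdown:
--         return markdown
--
--     lines = markdown.replace("\r\n", "\n").replace("\r", "\n").split("\n")
--     quote_started = False
--     insert_at: int | None = None
--
--     for idx, line in enumerate(lines):
--         stripped = line.strip()
--         if line.startswith(">"):
--             quote_started = True
--             continue
--         if quote_started and stripped == "":
--             insert_at = idx + 1
--             break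
--         if quote_started and not line.startswith(">"):
--             insert_at = idx
--             break
--
--     if insert_at is None:
--         suffix = "\n\n" if not markdown.endswith("\n") else "\n"
--         return markdown + suffix + image_markdown + "\n"
--
--     new_lines = lines[:insert_at] + [image_markdown, ""] + lines[insert_at:]
--     return "\n".join(new_lines)
-- ===== SOURCE B (Python) =====
-- def insert_header_image_after_first_blockquote(markdown: str, image_markdown: str) -> str:
--     if not image_markdown.strip() or image_markdown in markdown:
--         return markdown
--     lines = markdown.replace("\r\n", "\n").replace("\r", "\n").split("\n")
--     out = []
--     state = 0  # 0: before blockquote, 1: inside blockquote run, 2: image emitted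
--     for line in lines:
--         if state == 2:
--             out.append(line)
--         elif line.startswith(">"):
--             out.append(line)
--             state = 1
--         elif state == 1:
--             if line.strip() == "":
--                 out.extend([line, image_markdown, ""])
--             else:
--                 out.extend([image_markdown, "", line])
--             state = 2
--         else:
--             out.append(line)
--     if state != 2:
--         suffix = "\n" if markdown.endswith("\n") else "\n\n"
--         return markdown + suffix + image_markdown + "\n"
--     return "\n".join(out)
-- ===== Notes on version B (the rewrite author's own statement) =====
-- stated objective: alternative
-- what changed: Replaces A's index-finding loop plus take/drop list splice by a single-pass streaming state machine (states before/in-quote/emitted) that builds the new line list directly as it walks the lines, never computing an insertion index or slicing.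
import Mathlib
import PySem

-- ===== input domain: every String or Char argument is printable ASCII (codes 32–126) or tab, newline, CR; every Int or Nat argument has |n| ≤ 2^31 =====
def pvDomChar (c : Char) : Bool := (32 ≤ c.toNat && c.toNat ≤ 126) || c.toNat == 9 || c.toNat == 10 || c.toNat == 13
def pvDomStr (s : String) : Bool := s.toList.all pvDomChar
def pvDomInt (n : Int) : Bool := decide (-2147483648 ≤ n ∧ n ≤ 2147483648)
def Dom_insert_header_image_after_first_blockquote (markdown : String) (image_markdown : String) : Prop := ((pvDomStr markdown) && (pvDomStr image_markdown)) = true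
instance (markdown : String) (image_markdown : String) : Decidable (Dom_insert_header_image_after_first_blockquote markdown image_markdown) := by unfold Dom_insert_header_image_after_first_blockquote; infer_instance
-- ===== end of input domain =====

-- B replaces A's index search + list splice by a one-pass streaming state machine that emits the new line list directly; objective: alternative decomposition.

-- ===== PORT A =====
-- A's for-loop over enumerate(lines) with the quote_started flag; returns insert_at (none = fell off the loop)
def pvLoopA : List (List Char) → Nat → Bool → Option Nat
  | [], _, _ => none
  | l :: rest, idx, quote =>
    if PySem.Chars.startswith l ['>'] then pvLoopA rest (idx + 1) true
    else if quote && decide (PySem.Chars.strip l = []) then some (idx + 1)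
    else if quote then some idx
    else pvLoopA rest (idx + 1) quote

def insert_header_image_after_first_blockquote (markdown : String) (image_markdown : String) : String :=
  if PySem.Str.strip image_markdown == "" || PySem.Str.isIn image_markdown markdown then markdown
  else
    let lines := PySem.Chars.splitOn
      (PySem.Chars.replace (PySem.Chars.replace markdown.toList ['\r', '\n'] ['\n']) ['\r'] ['\n']) ['\n']
    match pvLoopA lines 0 false with
    | none =>
      let suffix : List Char := if PySem.Chars.endswith markdown.toList ['\n'] then ['\n'] else ['\n', '\n']
      String.ofList (markdown.toList ++ suffix ++ image_markdown.toList ++ ['\n'])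
    | some insertAt =>
      String.ofList (PySem.Chars.join ['\n'] (lines.take insertAt ++ [image_markdown.toList, []] ++ lines.drop insertAt))

-- ===== PORT B =====
-- B's for-loop: stream lines into `out`, switching state 0 → 1 → 2 and emitting the image inline.
def pvEmit : List (List Char) → List Char → List (List Char) → Nat → List (List Char) × Nat
  | [], _, out, s => (out, s)
  | l :: rest, img, out, s =>
    if s == 2 then pvEmit rest img (out ++ [l]) s
    else if PySem.Chars.startswith l ['>'] then pvEmit rest img (out ++ [l]) 1
    else if s == 1 then
      if PySem.Chars.strip l = [] then pvEmit rest img (out ++ [l, img, []]) 2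
      else pvEmit rest img (out ++ [img, [], l]) 2
    else pvEmit rest img (out ++ [l]) s

def insert_header_image_after_first_blockquote_alt (markdown : String) (image_markdown : String) : String :=
  if PySem.Str.strip image_markdown == "" || PySem.Str.isIn image_markdown markdown then markdown
  else
    let lines := PySem.Chars.splitOn
      (PySem.Chars.replace (PySem.Chars.replace markdown.toList ['\r', '\n'] ['\n']) ['\r'] ['\n']) ['\n']
    let r := pvEmit lines image_markdown.toList [] 0
    if r.2 ≠ 2 then
      let suffix : List Char := if PySem.Chars.endswith markdown.toList ['\n'] then ['\n'] else ['\n', '\n']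
      String.ofList (markdown.toList ++ suffix ++ image_markdown.toList ++ ['\n'])
    else
      String.ofList (PySem.Chars.join ['\n'] r.1)

-- ===== PRECONDITION & SPEC =====
def Spec_insert_header_image_after_first_blockquote (markdown : String) (image_markdown : String) (out : String) : Prop := out = insert_header_image_after_first_blockquote_alt markdown image_markdown
instance (markdown : String) (image_markdown : String) (out : String) : Decidable (Spec_insert_header_image_after_first_blockquote markdown image_markdown out) := by unfold Spec_insert_header_image_after_first_blockquote; infer_instance

-- ===== CLAIM (what is proved, stated in full; the proofs are below) =====
def Claim_equal_insert_header_image_after_first_blockquote : Prop := ∀ (markdown : String) (image_markdown : String), Dom_insert_header_image_after_first_blockquote markdown image_markdown → Spec_insert_header_image_after_first_blockquote markdown image_markdown (insert_header_image_after_first_blockquote markdown image_markdown)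

-- ===== LEMMAS AND PROOFS =====

-- A's loop index is translation-invariant in idx.
lemma pvLoopA_shift (ls : List (List Char)) (idx : Nat) (q : Bool) :
    pvLoopA ls idx q = (pvLoopA ls 0 q).map (· + idx) := by
  induction ls generalizing idx q with
  | nil => simp [pvLoopA]
  | cons l rest ih =>
    simp only [pvLoopA]
    split_ifs with h1 h2 h3
    · rw [ih (idx + 1), ih 1, Option.map_map]
      apply Option.map_congr; intro j _; simp [Function.comp]; omega
    · simp only [Option.map_some, Option.some.injEq]; omega
    · simp only [Option.map_some, Option.some.injEq]; omega
    · rw [ih (idx + 1), ih 1, Option.map_map]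
      apply Option.map_congr; intro j _; simp [Function.comp]; omega

-- Once the image is emitted (state 2) B just copies the remaining lines.
lemma pvEmit_done (ls : List (List Char)) (img : List Char) (out : List (List Char)) :
    pvEmit ls img out 2 = (out ++ ls, 2) := by
  induction ls generalizing out with
  | nil => simp [pvEmit]
  | cons l rest ih => simp [pvEmit, ih]

-- B's state machine computes exactly A's insertion-index splice (and never reaches state 2 when A's loop finds no insertion point).
lemma pvEmit_eq_loopA (ls : List (List Char)) (img : List Char) (out : List (List Char)) (q : Bool) :
    match pvLoopA ls 0 q with
    | none => (pvEmit ls img out (if q then 1 else 0)).2 ≠ 2 ∧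
              (pvEmit ls img out (if q then 1 else 0)).1 = out ++ ls
    | some i => pvEmit ls img out (if q then 1 else 0) =
                (out ++ ls.take i ++ img :: [] :: ls.drop i, 2) := by
  induction ls generalizing out q with
  | nil => cases q <;> simp [pvEmit, pvLoopA]
  | cons l rest ih =>
    by_cases h : PySem.Chars.startswith l ['>'] = true
    · have hb : pvLoopA (l :: rest) 0 q = (pvLoopA rest 0 true).map (· + 1) := by
        rw [pvLoopA, if_pos h, pvLoopA_shift]
      have he : pvEmit (l :: rest) img out (if q then 1 else 0) = pvEmit rest img (out ++ [l]) 1 := by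
        cases q <;> simp [pvEmit, h]
      have ht := ih (out ++ [l]) true
      simp only [reduceIte] at ht
      rw [hb, he]
      cases hf : pvLoopA rest 0 true with
      | none => rw [hf] at ht; simpa using ht
      | some i => rw [hf] at ht; simp [ht]
    · cases q with
      | true =>
        simp only [reduceIte]
        by_cases hs : PySem.Chars.strip l = []
        · have hb : pvLoopA (l :: rest) 0 true = some 1 := by
            simp [pvLoopA, h, hs]
          rw [hb]
          simp only [pvEmit, h, hs]
          simp [pvEmit_done]
        · have hb : pvLoopA (l :: rest) 0 true = some 0 := by
            simp [pvLoopA, h, hs]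
          rw [hb]
          simp only [pvEmit, h, hs]
          simp [pvEmit_done]
      | false =>
        simp only [Bool.false_eq_true, reduceIte]
        have hb : pvLoopA (l :: rest) 0 false = (pvLoopA rest 0 false).map (· + 1) := by
          rw [pvLoopA, if_neg h]
          simp only [Bool.false_and, Bool.false_eq_true, if_false]
          exact pvLoopA_shift rest 1 false
        have he : pvEmit (l :: rest) img out 0 = pvEmit rest img (out ++ [l]) 0 := by
          simp [pvEmit, h]
        have hz := ih (out ++ [l]) false
        simp only [Bool.false_eq_true, reduceIte] at hz
        rw [hb, he]
        cases hf : pvLoopA rest 0 false with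
        | none => rw [hf] at hz; simpa using hz
        | some i => rw [hf] at hz; simp [hz]

-- ===== VERDICT (by name: the statement is the Claim_ definition above) =====
theorem insert_header_image_after_first_blockquote_spec : Claim_equal_insert_header_image_after_first_blockquote := by
  intro markdown image_markdown _
  unfold Spec_insert_header_image_after_first_blockquote
  unfold insert_header_image_after_first_blockquote insert_header_image_after_first_blockquote_alt
  by_cases hg : (PySem.Str.strip image_markdown == "" || PySem.Str.isIn image_markdown markdown) = true
  · rw [if_pos hg, if_pos hg]
  · rw [if_neg hg, if_neg hg]
    dsimp only
    have hmain := pvEmit_eq_loopA (PySem.Chars.splitOn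
      (PySem.Chars.replace (PySem.Chars.replace markdown.toList ['\r', '\n'] ['\n']) ['\r'] ['\n'])
      ['\n']) image_markdown.toList [] false
    simp only [Bool.false_eq_true, reduceIte] at hmain
    cases hf : pvLoopA (PySem.Chars.splitOn
        (PySem.Chars.replace (PySem.Chars.replace markdown.toList ['\r', '\n'] ['\n']) ['\r'] ['\n'])
        ['\n']) 0 false with
    | none =>
      rw [hf] at hmain
      simp [hmain.1]
    | some i =>
      rw [hf] at hmain
      simp [hmain]
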